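/- GENERATED by mk_final_copies.py from the proof of the farm's unit `vorbis_deinit.3` (farm:vorbis_deinit.3.1: Proof.lean) as the
   re-elaboration sweep compiled it — do not edit. -/
/-
  `vorbis_deinit.3` (CONTRACTS 13, segment 3; stb_vorbis_fixed.c:4278-4292): the per-channel pointers with the machine clamp
  `i ≤ 15`, then the five `[2]` arrays — two loops in sequence, eight calls of `setup_free`, nine check sites, all inside `*p`.

  The proof is two walks, one per loop (`channels_loop`, `arrays_loop`), chained by `ReachVia.trans`. The memory part of the
  assertion `vorbis_deinit.At` is carried as ONE hypothesis `Seg3Mem e mem` (Lemmas.lean: H6 and the five saved-register slots): no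
  instruction of this segment reads a slot, and six `readLE` facts in the context make every side condition of the walk slow.
  After each call of `setup_free`: `v_after_call`, then `Seg3Mem.callee` takes `Seg3Mem` through the callee's footprint.
-/
import Asan.CheckWalk
import Vorbis.Spec.Units.vorbis_deinit_3
import Vorbis.Spec.Worked.vorbis_deinit_3_Lemmas

open X86 X86.User Asan Vorbis Vorbis.Spec

set_option maxRecDepth 4000
set_option maxHeartbeats 4000000

namespace Vorbis.Spec.vorbis_deinit_3

/-- **The per-channel loop** (0x107905 … 0x10798e; stb_vorbis_fixed.c:4278 `for (i=0; i < p->channels && i < 16; ++i)`): from the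
segment's entry assertion at `cut22` to the head of the next loop with `r12 = 0`. `mov r12d, 0 ; jmp` to the head `loop6`
(0x10796f); there the invariant is: `r12 = i ≤ 16`, `rsp = entry rsp − 40`, `rbx = p`, `Seg3Mem e mem` (H6 and the five slots), DF and
the MXCSR masks, the code span; measure `16 − i`. The body runs only with `i ≤ 15` (the machine clamp `cmp r12d, 0xf ; jle`), so the
three checked loads `p->channel_buffers[i]`, `p->previous_window[i]`, `p->finalY[i]` lie inside `*p` (OB1); each loaded value is
passed to `setup_free` in `rsi` and never dereferenced. Both exits (`channels ≤ i`, 0x107a49; `i > 15`, 0x107988) set `r12d = 0`. -/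
theorem channels_loop {Lay : Layout} (hLay : Lay.hi = 0x1000000) {μ : Microarch} (hμ : UserX.MicroOK μ) {u₀ : State}
    (hcode : HasCodeNat Lay u₀ Vorbis.L.vorbis_deinit.entry Vorbis.Code.code_vorbis_deinit.nat Vorbis.L.vorbis_deinit.size)
    (hload8 : Asan.SmallCheck Lay μ Vorbis.WayInv (Vorbis.CodeOK u₀) [.rax, .rcx, .rdx] 8 Vorbis.L.__asan_load8_noabort.entry)
    (h_sf : ∀ (others : List Obj) (frames : List (Nat × FrameLayout)),
      Calls Lay μ Vorbis.WayInv (Vorbis.conv u₀) Vorbis.L.setup_free.entry (Vorbis.Spec.setup_free.spec others frames))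
    (hload4 : Asan.SmallCheck Lay μ Vorbis.WayInv (Vorbis.CodeOK u₀) [.rax, .rcx, .rdx] 4 Vorbis.L.__asan_load4_noabort.entry)
    (others : List Obj) (frames : List (Nat × FrameLayout)) (Blk : Block → Prop) (e : State) (ret : Word) (v : State)
    (hat : vorbis_deinit.At Vorbis.L.vorbis_deinit.cut22 others frames Blk u₀ e ret v) :
    ReachVia Lay μ WayInv v (fun x =>
      vorbis_deinit.At Vorbis.L.vorbis_deinit.loop7 others frames Blk u₀ e ret x ∧ x.reg .r12 = 0) := by
  have he := hat.entry
  v_entry he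
  have hsf := h_sf others frames
  have hsh : ShadowPre others frames e := hat.pre.1
  have hobj : ObjLive others frames (e.reg .rdi).toNat := ObjLive.of_ob1 hat.pre.2.2.1 hat.pre.2.2.2.ob1
  have hwhere := hobj.where_ hsh.inv hsh.offText (by omega)
  obtain ⟨hw1, hw2, -⟩ := hwhere
  have w_rip := hat.rip
  have w_eq := Vorbis.conv_code_eqOn hat.code
  have hdf : v.flags .df = false := (show abiInv _ from hat.inv).1
  have hmx : v.mxcsr &&& 0x1F80 = 0x1F80 := (show abiInv _ from hat.inv).2
  -- 0x107905 (stb_vorbis_fixed.c:4278): `mov r12d, 0 ; jmp` to the loop head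
  u_walk hcode [hμ.vendor] until [Vorbis.L.vorbis_deinit.loop6] span [Vorbis.L.textLo, Vorbis.L.textHi] side (v_side)
  -- 0x10796f, the head of the per-channel loop: the counter generalised, the memory as `Seg3Mem`
  obtain ⟨i, w_r12', hi⟩ : ∃ i : Nat, s_10790b.reg .r12 = UInt64.ofNat i ∧ i ≤ 16 := ⟨0, w_r12, Nat.zero_le _⟩
  have w_rsp : s_10790b.reg .rsp = e.reg .rsp - 40 := by
    rw [w_kept .rsp rfl]
    exact hat.rsp
  have w_rbx : s_10790b.reg .rbx = e.reg .rdi := by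
    rw [w_kept .rbx rfl]
    exact hat.rbx
  have hk : Seg3Mem e s_10790b.mem := by
    rw [w_mem]
    exact Seg3Mem.of_at hat
  have hdf' : s_10790b.flags .df = false := by
    rw [w_flags]
    exact hdf
  have hmx' : s_10790b.mxcsr &&& 8064 = 8064 := by
    rw [w_mxcsr]
    exact hmx
  replace w_kept := w_kept.mono_all (S' := [.rbx, .rsp, .rbp, .r12, .r13, .rdi, .rax, .rcx, .rdx, .rsi, .r8, .r9, .r10, .r11,
    .r16, .r17, .r18, .r19, .r20, .r21, .r22, .r23, .r24, .r25, .r26, .r27, .r28, .r29, .r30, .r31]) (by rfl)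
  clear w_mem w_flags w_mxcsr w_r12 hdf hmx
  u_loop [i] (fun x => 16 - (x.reg .r12).toNat) (fun x =>
      vorbis_deinit.At Vorbis.L.vorbis_deinit.loop7 others frames Blk u₀ e ret x ∧ x.reg .r12 = 0)
  case exit =>
    exact ReachVia.done u_post
  -- the body, up to the first call: `hsx` (a rewrite rule of every step) turns `movsxd rbp, r12d` into `rbp = i`; the walk leaves the
  -- two check sites, the callee's `AtEntry` invariant and precondition, then the two exits and the state `setup_free` returned
  have hsx := sext_small i (by omega)
  have hti := counter_toInt i (by omega)
  u_walk hcode [hμ.vendor, hsx, hti] until [Vorbis.L.vorbis_deinit.loop6, Vorbis.L.vorbis_deinit.loop7] span [Vorbis.L.textLo, Vorbis.L.textHi] side (v_side)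
  case check_107973 =>
    -- `p->channels`
    rw [w_mem]
    exact (hk.push he_room he_top _).check he_top hobj hsh.inv _ 4 (by decide) (by u_omega) (by u_omega)
  case check_10791c =>
    -- `p->channel_buffers[i]`, `i ≤ 15` by the machine clamp
    have hi15 : i ≤ 15 := by
      rw [hti] at hbr_107986
      have e15 : (15#32).toInt = 15 := by decide
      omega
    rw [w_mem]
    exact (hk.push he_room he_top _).check he_top hobj hsh.inv _ 8 (by decide) (by u_omega) (by u_omega)
  case call_inv =>
    v_inv
  case pre_107929 =>
    refine ⟨hsh.callee ?_ ?_ ?_ ?_, ?_⟩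
    · rw [w_mem]
      exact (hk.push he_room he_top _).untouched he_top
    · rw [w_rsp]
      u_omega
    · rw [w_rsp]
      u_omega
    · rw [w_rsp]
      u_omega
    · rw [w_rdi]
      exact hobj
  · -- exit 1: `channels ≤ i`
    refine ReachVia.done (Or.inl ⟨at_of_kept hat.entry hat.pre w_rip w_rsp w_rbx ?_ ?_ (Vorbis.conv_code_in w_eq) ?_, ?_⟩)
    · rw [w_kept .r15 rfl]
      exact hat.r15
    · rw [w_mem]
      exact hk.push he_room he_top _
    · v_inv
    · rw [w_r12]
      rfl
  · -- 0x10792e, after `setup_free(p, p->channel_buffers[i])` (stb_vorbis_fixed.c:4279)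
    v_after_call w_rsp_107929 w_mem_107929
    replace hk : Seg3Mem e s_107929r.mem := hk.callee he_room he_top w_same
    have hi15 : i ≤ 15 := by
      rw [hti] at hbr_107986
      have e15 : (15#32).toInt = 15 := by decide
      omega
    clear w_same w_post w_code w_inv w_acc_107973 w_acc_10791c w_has_107973 hbr_10797c hbr_107986 w_df_107973 w_df_10791c
    clear w_rbx_107929 w_rsp_107929 w_rbp_107929 w_r12_107929 w_r13_107929 w_rdi_107929 w_rsi_107929 w_kept_107929
    clear w_mem_107929 w_mxcsr_107929 w_zmm_107929
    u_walk hcode [hμ.vendor, hsx, hti] until [Vorbis.L.vorbis_deinit.loop6, Vorbis.L.vorbis_deinit.loop7] span [Vorbis.L.textLo, Vorbis.L.textHi] side (v_side)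
    case check_10793d =>
      -- `p->previous_window[i]`
      rw [w_mem]
      exact (hk.push he_room he_top _).check he_top hobj hsh.inv _ 8 (by decide) (by u_omega) (by u_omega)
    case call_inv =>
      v_inv
    case pre_10794a =>
      exact hk.pre_setup_free hsh hobj he_room he_top he_align w_mem w_rsp w_rdi
    -- 0x10794f, after `setup_free(p, p->previous_window[i])` (stb_vorbis_fixed.c:4280)
    clear w_df w_mx w_sse
    v_after_call w_rsp_10794a w_mem_10794a
    replace hk : Seg3Mem e s_10794ar.mem := hk.callee he_room he_top w_same
    clear w_same w_post w_code w_inv w_acc_10793d w_has_10793d w_df_10793d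
    clear w_rbx_10794a w_rsp_10794a w_rbp_10794a w_r12_10794a w_r13_10794a w_rdi_10794a w_rsi_10794a w_kept_10794a
    clear w_mem_10794a w_mxcsr_10794a w_zmm_10794a
    u_walk hcode [hμ.vendor, hsx, hti] until [Vorbis.L.vorbis_deinit.loop6, Vorbis.L.vorbis_deinit.loop7] span [Vorbis.L.textLo, Vorbis.L.textHi] side (v_side)
    case check_10795a =>
      -- `p->finalY[i]`
      rw [w_mem]
      exact (hk.push he_room he_top _).check he_top hobj hsh.inv _ 8 (by decide) (by u_omega) (by u_omega)
    case call_inv =>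
      v_inv
    case pre_107966 =>
      exact hk.pre_setup_free hsh hobj he_room he_top he_align w_mem w_rsp w_rdi
    -- 0x10796b, after `setup_free(p, p->finalY[i])` (stb_vorbis_fixed.c:4284)
    clear w_df w_mx w_sse
    v_after_call w_rsp_107966 w_mem_107966
    replace hk : Seg3Mem e s_107966r.mem := hk.callee he_room he_top w_same
    clear w_same w_post w_code w_inv w_acc_10795a w_has_10795a w_df_10795a
    clear w_rbx_107966 w_rsp_107966 w_rbp_107966 w_r12_107966 w_r13_107966 w_rdi_107966 w_rsi_107966 w_kept_107966
    clear w_mem_107966 w_mxcsr_107966 w_zmm_107966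
    u_walk hcode [hμ.vendor, hsx, hti] until [Vorbis.L.vorbis_deinit.loop6, Vorbis.L.vorbis_deinit.loop7] span [Vorbis.L.textLo, Vorbis.L.textHi] side (v_side)
    -- 0x10796f again: the back edge, `i + 1 ≤ 16`
    have w_r12' : s_10796b.reg .r12 = UInt64.ofNat (i + 1) := by
      rw [w_r12]
      exact add1_small i (by omega)
    u_loop_back [i + 1]
    · omega
    · -- the direction flag: `add` writes status flags only
      rw [w_flags]
      simp only [X86.User.df_setStatus]
      exact w_df
    · rw [w_mxcsr]
      exact w_mx
    · -- the measure `16 − i`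
      rw [w_r12']
      u_omega
  · -- exit 2: `i > 15`
    refine ReachVia.done (Or.inl ⟨at_of_kept hat.entry hat.pre w_rip w_rsp w_rbx ?_ ?_ (Vorbis.conv_code_in w_eq) ?_, ?_⟩)
    · rw [w_kept .r15 rfl]
      exact hat.r15
    · rw [w_mem]
      exact hk.push he_room he_top _
    · v_inv
    · rw [w_r12]
      rfl

/-- **The loop over the five `[2]` arrays** (0x10798e … 0x107a54; stb_vorbis_fixed.c:4286 `for (i=0; i < 2; ++i)`): from the head
`loop7` with `r12 = 0` to the segment's exit assertion at `cut33`. Invariant at the head: `r12 = i ≤ 2`, `rsp = entry rsp − 40`,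
`rbx = p`, `r15` untouched, `Seg3Mem e mem`, DF and the MXCSR masks, the code span; measure `2 − i`. The body runs with `i ≤ 1`
(`cmp r12d, 1 ; jg`): the five checked loads `p->A[i]`, `B[i]`, `C[i]`, `window[i]`, `bit_reverse[i]` lie inside `*p` (OB1). -/
theorem arrays_loop {Lay : Layout} (hLay : Lay.hi = 0x1000000) {μ : Microarch} (hμ : UserX.MicroOK μ) {u₀ : State}
    (hcode : HasCodeNat Lay u₀ Vorbis.L.vorbis_deinit.entry Vorbis.Code.code_vorbis_deinit.nat Vorbis.L.vorbis_deinit.size)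
    (hload8 : Asan.SmallCheck Lay μ Vorbis.WayInv (Vorbis.CodeOK u₀) [.rax, .rcx, .rdx] 8 Vorbis.L.__asan_load8_noabort.entry)
    (h_sf : ∀ (others : List Obj) (frames : List (Nat × FrameLayout)),
      Calls Lay μ Vorbis.WayInv (Vorbis.conv u₀) Vorbis.L.setup_free.entry (Vorbis.Spec.setup_free.spec others frames))
    (others : List Obj) (frames : List (Nat × FrameLayout)) (Blk : Block → Prop) (e : State) (ret : Word) (v : State)
    (hat : vorbis_deinit.At Vorbis.L.vorbis_deinit.loop7 others frames Blk u₀ e ret v) (hr12 : v.reg .r12 = 0) :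
    ReachVia Lay μ WayInv v (vorbis_deinit.At Vorbis.L.vorbis_deinit.cut33 others frames Blk u₀ e ret) := by
  have he := hat.entry
  v_entry he
  have hsf := h_sf others frames
  have hsh : ShadowPre others frames e := hat.pre.1
  have hobj : ObjLive others frames (e.reg .rdi).toNat := ObjLive.of_ob1 hat.pre.2.2.1 hat.pre.2.2.2.ob1
  have hwhere := hobj.where_ hsh.inv hsh.offText (by omega)
  obtain ⟨hw1, hw2, -⟩ := hwhere
  -- 0x10798e, the head of the loop (stb_vorbis_fixed.c:4286): the counter generalised, the memory as `Seg3Mem`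
  obtain ⟨i, w_r12, hi⟩ : ∃ i : Nat, v.reg .r12 = UInt64.ofNat i ∧ i ≤ 2 := ⟨0, hr12, Nat.zero_le _⟩
  have w_rip := hat.rip
  have w_rsp := hat.rsp
  have w_rbx := hat.rbx
  have c_r15 := hat.r15
  have w_eq := Vorbis.conv_code_eqOn hat.code
  have hk : Seg3Mem e v.mem := Seg3Mem.of_at hat
  have hdf : v.flags .df = false := (show abiInv _ from hat.inv).1
  have hmx : v.mxcsr &&& 8064 = 8064 := (show abiInv _ from hat.inv).2
  have hentry := hat.entry
  have hpre := hat.pre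
  have w_kept : RegsKept [.rbx, .rsp, .rbp, .r12, .r13, .rdi, .rax, .rcx, .rdx, .rsi, .r8, .r9, .r10, .r11,
    .r16, .r17, .r18, .r19, .r20, .r21, .r22, .r23, .r24, .r25, .r26, .r27, .r28, .r29, .r30, .r31] v v := RegsKept.refl _ _
  clear hat hr12
  u_loop [i] (fun x => 2 - (x.reg .r12).toNat)
  -- the body, up to the first call: `cmp r12d, 1 ; jg` (the exit), `movsxd rbp, r12d` (`hsx`: `rbp = i`), the check of `&p->A[i]`
  have hsx := sext_small i (by omega)
  have hti := counter_toInt i (by omega)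
  u_walk hcode [hμ.vendor, hsx, hti] until [Vorbis.L.vorbis_deinit.loop7, Vorbis.L.vorbis_deinit.cut33] span [Vorbis.L.textLo, Vorbis.L.textHi] side (v_side)
  case check_1079aa =>
    -- `p->A[i]`, `i ≤ 1`
    rw [w_mem]
    exact (hk.push he_room he_top _).check he_top hobj hsh.inv _ 8 (by decide) (by u_omega) (by u_omega)
  case call_inv =>
    v_inv
  case pre_1079b7 =>
    exact hk.pre_setup_free hsh hobj he_room he_top he_align w_mem w_rsp w_rdi
  · -- 0x107a54, the exit `i > 1`: the assertion of the next segment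
    refine ReachVia.done (Or.inl (at_of_kept hentry hpre w_rip w_rsp w_rbx ?_ ?_ (Vorbis.conv_code_in w_eq) ?_))
    · rw [w_kept .r15 rfl]
      exact c_r15
    · rw [w_mem]
      exact hk
    · v_inv
  -- 0x1079bc, after `setup_free(p, p->A[i])` (stb_vorbis_fixed.c:4287)
  have hi1 : i ≤ 1 := by
    rw [hti] at hbr_107992
    have e1 : (1#32).toInt = 1 := by decide
    omega
  v_after_call w_rsp_1079b7 w_mem_1079b7
  replace hk : Seg3Mem e s_1079b7r.mem := hk.callee he_room he_top w_same
  clear w_same w_post w_code w_inv w_acc_1079aa w_has_1079aa w_df_1079aa hbr_107992 hdf hmx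
  clear w_rbx_1079b7 w_rsp_1079b7 w_rbp_1079b7 w_r12_1079b7 w_r13_1079b7 w_rdi_1079b7 w_rsi_1079b7 w_kept_1079b7
  clear w_mem_1079b7 w_mxcsr_1079b7 w_zmm_1079b7
  u_walk hcode [hμ.vendor, hsx, hti] until [Vorbis.L.vorbis_deinit.loop7, Vorbis.L.vorbis_deinit.cut33] span [Vorbis.L.textLo, Vorbis.L.textHi] side (v_side)
  case check_1079cb =>
    -- `p->B[i]`, `i ≤ 1`
    rw [w_mem]
    exact (hk.push he_room he_top _).check he_top hobj hsh.inv _ 8 (by decide) (by u_omega) (by u_omega)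
  case call_inv =>
    v_inv
  case pre_1079d8 =>
    exact hk.pre_setup_free hsh hobj he_room he_top he_align w_mem w_rsp w_rdi
  -- 0x1079dd, after `setup_free(p, p->B[i])` (stb_vorbis_fixed.c:4288)
  clear w_df w_mx w_sse
  v_after_call w_rsp_1079d8 w_mem_1079d8
  replace hk : Seg3Mem e s_1079d8r.mem := hk.callee he_room he_top w_same
  clear w_same w_post w_code w_inv w_acc_1079cb w_has_1079cb w_df_1079cb
  clear w_rbx_1079d8 w_rsp_1079d8 w_rbp_1079d8 w_r12_1079d8 w_r13_1079d8 w_rdi_1079d8 w_rsi_1079d8 w_kept_1079d8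
  clear w_mem_1079d8 w_mxcsr_1079d8 w_zmm_1079d8
  u_walk hcode [hμ.vendor, hsx, hti] until [Vorbis.L.vorbis_deinit.loop7, Vorbis.L.vorbis_deinit.cut33] span [Vorbis.L.textLo, Vorbis.L.textHi] side (v_side)
  case check_1079ec =>
    -- `p->C[i]`, `i ≤ 1`
    rw [w_mem]
    exact (hk.push he_room he_top _).check he_top hobj hsh.inv _ 8 (by decide) (by u_omega) (by u_omega)
  case call_inv =>
    v_inv
  case pre_1079f9 =>
    exact hk.pre_setup_free hsh hobj he_room he_top he_align w_mem w_rsp w_rdi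
  -- 0x1079fe, after `setup_free(p, p->C[i])` (stb_vorbis_fixed.c:4289)
  clear w_df w_mx w_sse
  v_after_call w_rsp_1079f9 w_mem_1079f9
  replace hk : Seg3Mem e s_1079f9r.mem := hk.callee he_room he_top w_same
  clear w_same w_post w_code w_inv w_acc_1079ec w_has_1079ec w_df_1079ec
  clear w_rbx_1079f9 w_rsp_1079f9 w_rbp_1079f9 w_r12_1079f9 w_r13_1079f9 w_rdi_1079f9 w_rsi_1079f9 w_kept_1079f9
  clear w_mem_1079f9 w_mxcsr_1079f9 w_zmm_1079f9
  u_walk hcode [hμ.vendor, hsx, hti] until [Vorbis.L.vorbis_deinit.loop7, Vorbis.L.vorbis_deinit.cut33] span [Vorbis.L.textLo, Vorbis.L.textHi] side (v_side)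
  case check_107a0d =>
    -- `p->window[i]`, `i ≤ 1`
    rw [w_mem]
    exact (hk.push he_room he_top _).check he_top hobj hsh.inv _ 8 (by decide) (by u_omega) (by u_omega)
  case call_inv =>
    v_inv
  case pre_107a1a =>
    exact hk.pre_setup_free hsh hobj he_room he_top he_align w_mem w_rsp w_rdi
  -- 0x107a1f, after `setup_free(p, p->window[i])` (stb_vorbis_fixed.c:4290)
  clear w_df w_mx w_sse
  v_after_call w_rsp_107a1a w_mem_107a1a
  replace hk : Seg3Mem e s_107a1ar.mem := hk.callee he_room he_top w_same
  clear w_same w_post w_code w_inv w_acc_107a0d w_has_107a0d w_df_107a0d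
  clear w_rbx_107a1a w_rsp_107a1a w_rbp_107a1a w_r12_107a1a w_r13_107a1a w_rdi_107a1a w_rsi_107a1a w_kept_107a1a
  clear w_mem_107a1a w_mxcsr_107a1a w_zmm_107a1a
  u_walk hcode [hμ.vendor, hsx, hti] until [Vorbis.L.vorbis_deinit.loop7, Vorbis.L.vorbis_deinit.cut33] span [Vorbis.L.textLo, Vorbis.L.textHi] side (v_side)
  case check_107a2e =>
    -- `p->bit_reverse[i]`, `i ≤ 1`
    rw [w_mem]
    exact (hk.push he_room he_top _).check he_top hobj hsh.inv _ 8 (by decide) (by u_omega) (by u_omega)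
  case call_inv =>
    v_inv
  case pre_107a3b =>
    exact hk.pre_setup_free hsh hobj he_room he_top he_align w_mem w_rsp w_rdi
  -- 0x107a40, after `setup_free(p, p->bit_reverse[i])` (stb_vorbis_fixed.c:4291)
  clear w_df w_mx w_sse
  v_after_call w_rsp_107a3b w_mem_107a3b
  replace hk : Seg3Mem e s_107a3br.mem := hk.callee he_room he_top w_same
  clear w_same w_post w_code w_inv w_acc_107a2e w_has_107a2e w_df_107a2e
  clear w_rbx_107a3b w_rsp_107a3b w_rbp_107a3b w_r12_107a3b w_r13_107a3b w_rdi_107a3b w_rsi_107a3b w_kept_107a3b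
  clear w_mem_107a3b w_mxcsr_107a3b w_zmm_107a3b
  u_walk hcode [hμ.vendor, hsx, hti] until [Vorbis.L.vorbis_deinit.loop7, Vorbis.L.vorbis_deinit.cut33] span [Vorbis.L.textLo, Vorbis.L.textHi] side (v_side)
  -- 0x10798e again: the back edge, `i + 1 ≤ 2`
  have w_r12' : s_107a44.reg .r12 = UInt64.ofNat (i + 1) := by
    rw [w_r12]
    exact add1_small i (by omega)
  u_loop_back [i + 1]
  · omega
  · -- r15 is not used by the function
    rw [w_kept .r15 rfl]
    exact c_r15
  · -- the direction flag: `add` writes status flags only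
    rw [w_flags]
    simp only [X86.User.df_setStatus]
    exact w_df
  · rw [w_mxcsr]
    exact w_mx
  · exact RegsKept.refl _ _
  · -- the measure `2 − i`
    rw [w_r12']
    u_omega

end Vorbis.Spec.vorbis_deinit_3

/-- Segment 3 of `vorbis_deinit` (`cut22` … `cut33`): the per-channel loop, then the loop over the five `[2]` arrays. -/
theorem Vorbis.Spec.Worked.vorbis_deinit_3_ok : Vorbis.Spec.vorbis_deinit_3.Statement := by
  intro Lay hLay μ hμ u₀ hcode hload8 h_sf hload4 others frames Blk e ret v hat
  -- 0x107905 … 0x10798e: the per-channel loop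
  refine (Vorbis.Spec.vorbis_deinit_3.channels_loop hLay hμ hcode hload8 h_sf hload4 others frames Blk e ret v hat).trans ?_
  -- 0x10798e … 0x107a54: the five `[2]` arrays
  intro x hx
  exact Vorbis.Spec.vorbis_deinit_3.arrays_loop hLay hμ hcode hload8 h_sf others frames Blk e ret x hx.1 hx.2
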